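-- pv_equiv track=rewrite | github.com/MrBrantCode/unitest_baseline | mut_generate/mist_train_taco/taco_5649/solution.py | calculate_discarded_leaves
-- ===== SOURCE A (Python) =====
-- def calculate_discarded_leaves(n, m, a, b, ds):
--     is_waste = [False for _ in range(n)]
--
--     # Step 1: Identify initial discard candidates
--     for i in range(n):
--         if ds[i] >= a:
--             is_waste[i] = True
--         else:
--             break
--
--     # Step 2: Reconsider discard candidates if necessary
--     if sum(is_waste) > n - m:
--         for i in range(n)[::-1]:
--             if is_waste[i]:
--                 if ds[i] <= b:
--                     is_waste[i] = False
--                 else: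
--                     break
--
--     # Return the number of leaves to be discarded
--     return sum(is_waste)
-- ===== SOURCE B (Python) =====
-- def calculate_discarded_leaves(n, m, a, b, ds):
--     # Single forward pass: no boolean array and no backward unmarking loop.
--     # run = length of the leading run with ds[i] >= a; keep = 1 + the last
--     # index in that run with ds[i] > b (what survives the reconsideration).
--     run = 0
--     keep = 0
--     i = 0
--     while i < n and ds[i] >= a:
--         run += 1
--         if ds[i] > b:
--             keep = run
--         i += 1
--     return run if run <= n - m else keep
-- ===== Notes on version B (the rewrite author's own statement) =====
-- stated objective: alternative
-- what changed: Replaces A's two-phase mark/unmark over a boolean array (forward marking pass plus a backward unmarking pass over range(n) reversed) by ONE forward scan with two integer accumulators: run = length of the leading run with ds[i] >= a, and keep = 1 + the last position in that run with ds[i] > b; the answer is run if run <= n-m else keep, so the backward pass and the array disappear entirely.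
import Mathlib
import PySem

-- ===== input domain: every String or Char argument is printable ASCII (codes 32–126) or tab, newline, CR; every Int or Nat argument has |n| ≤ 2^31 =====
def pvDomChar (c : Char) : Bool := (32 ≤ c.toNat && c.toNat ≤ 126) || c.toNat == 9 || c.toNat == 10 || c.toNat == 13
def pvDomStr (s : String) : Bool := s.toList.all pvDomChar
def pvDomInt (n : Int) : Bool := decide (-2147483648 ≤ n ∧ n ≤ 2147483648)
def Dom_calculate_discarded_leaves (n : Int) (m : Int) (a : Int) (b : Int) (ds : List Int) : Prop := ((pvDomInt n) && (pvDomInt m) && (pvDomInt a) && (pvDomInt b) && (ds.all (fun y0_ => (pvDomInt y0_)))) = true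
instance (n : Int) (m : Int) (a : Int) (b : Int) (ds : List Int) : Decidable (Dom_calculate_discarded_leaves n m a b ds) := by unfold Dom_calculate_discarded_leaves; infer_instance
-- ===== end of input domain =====

-- B replaces A's boolean mark array and its two passes (forward marking, backward unmarking)
-- by ONE forward scan with two integer accumulators (run length, surviving count); equivalence
-- about the return value on Pre_ (no IndexError).


-- ===== PORT A =====
-- Step-1 loop: `for i in range(n): if ds[i] >= a: is_waste[i] = True else: break`
-- ds[i] is ported as pyGetD (default 0): Pre_ excludes exactly the inputs where Python would raise IndexError.
def pvA_loop1 (ds : List Int) (a : Int) : List Int → List Bool → List Bool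
  | [], w => w
  | i :: rest, w =>
    if PySem.List.pyGetD ds i 0 ≥ a then
      pvA_loop1 ds a rest (PySem.List.pySetD w i true)
    else w

-- Step-2 loop: `for i in range(n)[::-1]: if is_waste[i]: (if ds[i] <= b: unmark else break)`
def pvA_loop2 (ds : List Int) (b : Int) : List Int → List Bool → List Bool
  | [], w => w
  | i :: rest, w =>
    if PySem.List.pyGetD w i false then
      if PySem.List.pyGetD ds i 0 ≤ b then
        pvA_loop2 ds b rest (PySem.List.pySetD w i false)
      else w
    else pvA_loop2 ds b rest w

-- sum(is_waste): Python sums booleans as 0/1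
def pvSumBool (w : List Bool) : Int := w.foldl (fun s x => s + (if x then 1 else 0)) 0

def calculate_discarded_leaves (n : Int) (m : Int) (a : Int) (b : Int) (ds : List Int) : Int :=
  let w0 := (PySem.List.pyRange 0 n 1).map (fun _ => false)
  let w1 := pvA_loop1 ds a (PySem.List.pyRange 0 n 1) w0
  let w2 := if pvSumBool w1 > n - m then
      -- range(n)[::-1] is the reversed range
      pvA_loop2 ds b (PySem.List.pyRange 0 n 1).reverse w1
    else w1
  pvSumBool w2

-- ===== PORT B =====
-- `while i < n and ds[i] >= a: run += 1; if ds[i] > b: keep = run; i += 1`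
-- (pyGetD is total; Pre_ excludes the inputs where Python's ds[i] would raise)
def pvB_loop (a : Int) (b : Int) (ds : List Int) (n : Int) (i : Int) (run : Int) (keep : Int) : Int × Int :=
  if _h : i < n ∧ PySem.List.pyGetD ds i 0 ≥ a then
    pvB_loop a b ds n (i + 1) (run + 1) (if PySem.List.pyGetD ds i 0 > b then run + 1 else keep)
  else (run, keep)
termination_by (n - i).toNat
decreasing_by omega

def calculate_discarded_leaves_alt (n : Int) (m : Int) (a : Int) (b : Int) (ds : List Int) : Int :=
  let rk := pvB_loop a b ds n 0 0 0
  if rk.1 ≤ n - m then rk.1 else rk.2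

-- ===== PRECONDITION & SPEC =====
-- Pre_ excludes exactly the inputs on which A raises IndexError: the forward scan runs past the
-- end of ds, i.e. n > len(ds) while every element of ds is >= a.
def Pre_calculate_discarded_leaves (n : Int) (m : Int) (a : Int) (b : Int) (ds : List Int) : Prop :=
  n ≤ (ds.length : Int) ∨ ∃ x ∈ ds, x < a
instance (n : Int) (m : Int) (a : Int) (b : Int) (ds : List Int) : Decidable (Pre_calculate_discarded_leaves n m a b ds) := by unfold Pre_calculate_discarded_leaves; infer_instance

def pvWitness_calculate_discarded_leaves : Int × Int × Int × Int × List Int := (4, 2, 2, 3, [5, 3, 2, 1])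

def Spec_calculate_discarded_leaves (n : Int) (m : Int) (a : Int) (b : Int) (ds : List Int) (out : Int) : Prop := out = calculate_discarded_leaves_alt n m a b ds
instance (n : Int) (m : Int) (a : Int) (b : Int) (ds : List Int) (out : Int) : Decidable (Spec_calculate_discarded_leaves n m a b ds out) := by unfold Spec_calculate_discarded_leaves; infer_instance

-- ===== CLAIM (what is proved, stated in full; the proofs are below) =====
def Claim_equal_calculate_discarded_leaves : Prop := ∀ (n : Int) (m : Int) (a : Int) (b : Int) (ds : List Int), Dom_calculate_discarded_leaves n m a b ds → Pre_calculate_discarded_leaves n m a b ds → Spec_calculate_discarded_leaves n m a b ds (calculate_discarded_leaves n m a b ds)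

-- ===== LEMMAS AND PROOFS =====

-- sum of booleans
theorem pvSumBool_shift (l : List Bool) : ∀ (s : Int),
    l.foldl (fun s x => s + (if x then 1 else 0)) s = s + pvSumBool l := by
  induction l with
  | nil => intro s; simp [pvSumBool]
  | cons x t ih =>
    intro s
    simp only [pvSumBool, List.foldl_cons] at *
    rw [ih, ih (0 + _)]
    ring

theorem pvSumBool_mark (p q : Nat) :
    pvSumBool (List.replicate p true ++ List.replicate q false) = (p : Int) := by
  induction p with
  | zero =>
    simp only [List.replicate, List.nil_append, Nat.cast_zero]
    induction q with
    | zero => simp [pvSumBool]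
    | succ k ih =>
      rw [List.replicate_succ]
      simp only [pvSumBool, List.foldl_cons] at ih ⊢
      simpa using ih
  | succ k ih =>
    rw [List.replicate_succ, List.cons_append]
    simp only [pvSumBool, List.foldl_cons] at ih ⊢
    rw [pvSumBool_shift]
    simp only [pvSumBool] at *
    rw [ih]
    push_cast
    ring

-- lookup in a mark list
theorem pv_getD_mark (p q j : Nat) :
    (List.replicate p true ++ List.replicate q false).getD j false = decide (j < p) := by
  by_cases h1 : j < p
  · rw [List.getD_eq_getElem _ _ (by simp; omega), List.getElem_append_left (by simpa using h1)]
    simp [h1]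
  · by_cases h2 : j < p + q
    · rw [List.getD_eq_getElem _ _ (by simp; omega), List.getElem_append_right (by simp; omega)]
      simp [h1]
    · rw [List.getD_eq_default _ _ (by simp; omega)]
      simp [h1]

-- setting the first false mark to true
theorem pv_set_mark (c r : Nat) :
    (List.replicate c true ++ List.replicate (r + 1) false).set c true
      = List.replicate (c + 1) true ++ List.replicate r false := by
  induction c with
  | zero => simp [List.replicate_succ]
  | succ k ih => simpa [List.replicate_succ] using ih

-- unsetting the last true mark
theorem pv_unset_mark (c r : Nat) :
    (List.replicate (c + 1) true ++ List.replicate r false).set c false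
      = List.replicate c true ++ List.replicate (r + 1) false := by
  induction c with
  | zero => simp [List.replicate_succ]
  | succ k ih => simpa [List.replicate_succ] using ih

-- characterization of A's forward marking loop
theorem pv_loop1_char (ds : List Int) (a n : Int) (hn : 0 ≤ n) :
    ∀ (k c : Nat), c + k = n.toNat →
      ((∀ x ∈ ds.drop c, a ≤ x) → n ≤ (ds.length : Int)) →
      pvA_loop1 ds a (PySem.List.pyRange (c : Int) n 1)
          (List.replicate c true ++ List.replicate (n.toNat - c) false)
        = List.replicate (min n.toNat (c + ((ds.drop c).takeWhile (fun x => decide (x ≥ a))).length)) true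
          ++ List.replicate (n.toNat - min n.toNat (c + ((ds.drop c).takeWhile (fun x => decide (x ≥ a))).length)) false := by
  intro k
  induction k with
  | zero =>
    intro c hc _
    have hc' : c = n.toNat := by omega
    subst hc'
    rw [PySem.List.pyRange_one_eq_nil (by omega)]
    simp only [pvA_loop1]
    have h1 : min n.toNat (n.toNat + ((ds.drop n.toNat).takeWhile (fun x => decide (x ≥ a))).length) = n.toNat := by omega
    rw [h1]
  | succ k ih =>
    intro c hc H
    have hcn : (c : Int) < n := by omega
    have hclen : c < ds.length := by
      by_contra hge
      have : ds.drop c = [] := List.drop_eq_nil_of_le (by omega)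
      have := H (by simp [this])
      omega
    rw [PySem.List.pyRange_one_cons hcn]
    have hdrop : ds.drop c = ds[c] :: ds.drop (c + 1) := List.drop_eq_getElem_cons hclen
    have hget : PySem.List.pyGetD ds (c : Int) 0 = ds[c] := by
      rw [PySem.List.pyGetD_natCast, List.getD_eq_getElem _ _ hclen]
    simp only [pvA_loop1, hget]
    by_cases hda : ds[c] ≥ a
    · rw [if_pos hda]
      have hset : PySem.List.pySetD (List.replicate c true ++ List.replicate (n.toNat - c) false) (c : Int) true
          = List.replicate (c + 1) true ++ List.replicate (n.toNat - (c + 1)) false := by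
        have : n.toNat - c = (n.toNat - (c + 1)) + 1 := by omega
        rw [PySem.List.pySetD_natCast, this, pv_set_mark]
      have hc1 : ((c : Int) + 1) = ((c + 1 : Nat) : Int) := by push_cast; ring
      have H' : (∀ x ∈ ds.drop (c + 1), a ≤ x) → n ≤ (ds.length : Int) := by
        intro hall
        apply H
        rw [hdrop]
        intro x hx
        rcases List.mem_cons.mp hx with h | h
        · subst h; exact hda
        · exact hall x h
      rw [hset, hc1, ih (c + 1) (by omega) H']
      have : ((ds.drop c).takeWhile (fun x => decide (x ≥ a))).length
          = ((ds.drop (c + 1)).takeWhile (fun x => decide (x ≥ a))).length + 1 := by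
        rw [hdrop, List.takeWhile_cons, if_pos (by simpa using hda)]
        simp
      rw [this]
      have : min n.toNat (c + (((ds.drop (c + 1)).takeWhile (fun x => decide (x ≥ a))).length + 1))
          = min n.toNat ((c + 1) + ((ds.drop (c + 1)).takeWhile (fun x => decide (x ≥ a))).length) := by omega
      rw [this]
    · rw [if_neg hda]
      have : (ds.drop c).takeWhile (fun x => decide (x ≥ a)) = [] := by
        rw [hdrop, List.takeWhile_cons, if_neg (by simpa using hda)]
      rw [this]
      have : min n.toNat (c + 0) = c := by omega
      simp only [List.length_nil, this]

-- A's backward loop skips the unmarked suffix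
theorem pv_loop2_skip (ds : List Int) (b : Int) (p q : Nat) :
    ∀ (js rest : List Int), (∀ i ∈ js, (p : Int) ≤ i) →
      pvA_loop2 ds b (js ++ rest) (List.replicate p true ++ List.replicate q false)
        = pvA_loop2 ds b rest (List.replicate p true ++ List.replicate q false) := by
  intro js
  induction js with
  | nil => intro rest _; simp
  | cons i t ih =>
    intro rest hall
    have hip : (p : Int) ≤ i := hall i (by simp)
    have hget : PySem.List.pyGetD (List.replicate p true ++ List.replicate q false) i false = false := by
      rw [show i = ((i.toNat : Nat) : Int) by omega, PySem.List.pyGetD_natCast, pv_getD_mark]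
      simp
      omega
    simp only [List.cons_append, pvA_loop2, hget, Bool.false_eq_true, if_false]
    exact ih rest (fun j hj => hall j (by simp [hj]))

-- A's backward loop unmarks the trailing run of the marked prefix with ds[i] <= b
theorem pv_loop2_unmark (ds : List Int) (b : Int) :
    ∀ (c q : Nat), c ≤ ds.length →
      pvA_loop2 ds b (PySem.List.pyRange 0 (c : Int) 1).reverse
          (List.replicate c true ++ List.replicate q false)
        = List.replicate (c - (((ds.take c).reverse.takeWhile (fun x => decide (x ≤ b))).length)) true
          ++ List.replicate (q + (((ds.take c).reverse.takeWhile (fun x => decide (x ≤ b))).length)) false := by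
  intro c
  induction c with
  | zero => intro q _; simp [pvA_loop2, PySem.List.pyRange_one_eq_nil]
  | succ c ih =>
    intro q hlen
    have hc1 : ((c + 1 : Nat) : Int) = (c : Int) + 1 := by push_cast; ring
    rw [hc1, PySem.List.pyRange_one_succ_right (by positivity), List.reverse_append]
    simp only [List.reverse_cons, List.reverse_nil, List.nil_append, List.singleton_append]
    have hclen : c < ds.length := by omega
    have hwget : PySem.List.pyGetD (List.replicate (c + 1) true ++ List.replicate q false) (c : Int) false = true := by
      rw [PySem.List.pyGetD_natCast, pv_getD_mark]
      simp
    have hget : PySem.List.pyGetD ds (c : Int) 0 = ds[c] := by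
      rw [PySem.List.pyGetD_natCast, List.getD_eq_getElem _ _ hclen]
    have htake : (ds.take (c + 1)).reverse = ds[c] :: (ds.take c).reverse := by
      rw [List.take_add_one]
      simp [List.getElem?_eq_getElem hclen]
    simp only [pvA_loop2, hwget, if_pos, hget]
    by_cases hdb : ds[c] ≤ b
    · rw [if_pos hdb]
      have hset : PySem.List.pySetD (List.replicate (c + 1) true ++ List.replicate q false) (c : Int) false
          = List.replicate c true ++ List.replicate (q + 1) false := by
        rw [PySem.List.pySetD_natCast, pv_unset_mark]
      rw [hset, ih (q + 1) (by omega)]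
      rw [htake, List.takeWhile_cons, if_pos (by simpa using hdb)]
      simp only [List.length_cons]
      have h1 : c + 1 - (((ds.take c).reverse.takeWhile (fun x => decide (x ≤ b))).length + 1)
          = c - ((ds.take c).reverse.takeWhile (fun x => decide (x ≤ b))).length := by omega
      have h2 : q + (((ds.take c).reverse.takeWhile (fun x => decide (x ≤ b))).length + 1)
          = (q + 1) + ((ds.take c).reverse.takeWhile (fun x => decide (x ≤ b))).length := by omega
      rw [h1, h2]
    · rw [if_neg hdb]
      rw [htake, List.takeWhile_cons, if_neg (by simpa using hdb)]
      simp

-- characterization of B's single forward loop: starting at index c with run = c and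
-- keep = c - (length of trailing <=b run of the processed prefix), it returns
-- (P, P - that trailing length at P) for P = min n.toNat (c + forward run from c)
theorem pvB_loop_char (ds : List Int) (a b n : Int) (hn : 0 ≤ n) :
    ∀ (k c : Nat), c + k = n.toNat → c ≤ ds.length →
      ((∀ x ∈ ds.drop c, a ≤ x) → n ≤ (ds.length : Int)) →
      pvB_loop a b ds n (c : Int) (c : Int)
          ((c : Int) - (((ds.take c).reverse.takeWhile (fun x => decide (x ≤ b))).length : Int))
        = (((min n.toNat (c + ((ds.drop c).takeWhile (fun x => decide (x ≥ a))).length) : Nat) : Int),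
           ((min n.toNat (c + ((ds.drop c).takeWhile (fun x => decide (x ≥ a))).length) : Nat) : Int)
             - (((ds.take (min n.toNat (c + ((ds.drop c).takeWhile (fun x => decide (x ≥ a))).length))).reverse.takeWhile (fun x => decide (x ≤ b))).length : Int)) := by
  intro k
  induction k with
  | zero =>
    intro c hc _ _
    have hc' : c = n.toNat := by omega
    subst hc'
    rw [pvB_loop.eq_def, dif_neg (fun h => absurd h.1 (by omega))]
    have h1 : min n.toNat (n.toNat + ((ds.drop n.toNat).takeWhile (fun x => decide (x ≥ a))).length) = n.toNat := by omega
    rw [h1]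
  | succ k ih =>
    intro c hc hcl H
    have hcn : (c : Int) < n := by omega
    have hclen : c < ds.length := by
      by_contra hge
      have : ds.drop c = [] := List.drop_eq_nil_of_le (by omega)
      have := H (by simp [this])
      omega
    have hdrop : ds.drop c = ds[c] :: ds.drop (c + 1) := List.drop_eq_getElem_cons hclen
    have hget : PySem.List.pyGetD ds (c : Int) 0 = ds[c] := by
      rw [PySem.List.pyGetD_natCast, List.getD_eq_getElem _ _ hclen]
    have htake : (ds.take (c + 1)).reverse = ds[c] :: (ds.take c).reverse := by
      rw [List.take_add_one]
      simp [List.getElem?_eq_getElem hclen]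
    by_cases hda : ds[c] ≥ a
    · rw [pvB_loop.eq_def, dif_pos ⟨hcn, by rw [hget]; exact hda⟩]
      have H' : (∀ x ∈ ds.drop (c + 1), a ≤ x) → n ≤ (ds.length : Int) := by
        intro hall
        apply H
        rw [hdrop]
        intro x hx
        rcases List.mem_cons.mp hx with h | h
        · subst h; exact hda
        · exact hall x h
      have hkeep : (if PySem.List.pyGetD ds (c : Int) 0 > b then (c : Int) + 1
            else (c : Int) - (((ds.take c).reverse.takeWhile (fun x => decide (x ≤ b))).length : Int))
          = ((c + 1 : Nat) : Int) - (((ds.take (c + 1)).reverse.takeWhile (fun x => decide (x ≤ b))).length : Int) := by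
        rw [hget]
        by_cases hdb : ds[c] ≤ b
        · rw [if_neg (by omega), htake, List.takeWhile_cons, if_pos (by simpa using hdb)]
          simp only [List.length_cons]
          push_cast
          ring
        · rw [if_pos (by omega), htake, List.takeWhile_cons, if_neg (by simpa using hdb)]
          push_cast
          simp
      have hc1 : ((c : Int) + 1) = ((c + 1 : Nat) : Int) := by push_cast; ring
      rw [hkeep, hc1, ih (c + 1) (by omega) (by omega) H']
      have hts : ((ds.drop c).takeWhile (fun x => decide (x ≥ a))).length
          = ((ds.drop (c + 1)).takeWhile (fun x => decide (x ≥ a))).length + 1 := by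
        rw [hdrop, List.takeWhile_cons, if_pos (by simpa using hda)]
        simp
      rw [hts]
      have : min n.toNat (c + (((ds.drop (c + 1)).takeWhile (fun x => decide (x ≥ a))).length + 1))
          = min n.toNat ((c + 1) + ((ds.drop (c + 1)).takeWhile (fun x => decide (x ≥ a))).length) := by omega
      rw [this]
    · rw [pvB_loop.eq_def, dif_neg (by rw [hget]; intro h; exact hda h.2)]
      have : (ds.drop c).takeWhile (fun x => decide (x ≥ a)) = [] := by
        rw [hdrop, List.takeWhile_cons, if_neg (by simpa using hda)]
      rw [this]
      have hmin : min n.toNat (c + ([] : List Int).length) = c := by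
        simp only [List.length_nil]
        omega
      rw [hmin]

-- ===== VERDICT (by name: the statement is the Claim_ definition above) =====
theorem calculate_discarded_leaves_spec : Claim_equal_calculate_discarded_leaves := by
  intro n m a b ds _ hpre
  unfold Spec_calculate_discarded_leaves
  simp only [calculate_discarded_leaves, calculate_discarded_leaves_alt]
  by_cases hn : 0 < n
  · -- main case
    set run : Nat := (ds.takeWhile (fun x => decide (x ≥ a))).length with hrun
    have hrunlen : run ≤ ds.length := by
      have := congrArg List.length (List.takeWhile_append_dropWhile (p := fun x => decide (x ≥ a)) (l := ds))
      simp only [List.length_append] at this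
      omega
    set P : Nat := min n.toNat run with hP
    have hH : (∀ x ∈ ds.drop 0, a ≤ x) → n ≤ (ds.length : Int) := by
      intro hall
      rcases hpre with h | ⟨x, hx, hxa⟩
      · exact h
      · exact absurd (hall x (by simpa using hx)) (by omega)
    -- A's side
    have hw0 : (PySem.List.pyRange 0 n 1).map (fun _ => false)
        = List.replicate 0 true ++ List.replicate (n.toNat - 0) false := by
      simp [List.map_const', PySem.List.length_pyRange_one]
    have hw1 := pv_loop1_char ds a n (by omega) n.toNat 0 (by omega) hH
    rw [show ((0 : Nat) : Int) = (0 : Int) by norm_num] at hw1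
    simp only [List.drop_zero, Nat.zero_add] at hw1
    rw [hw0, hw1]
    -- B's side
    have hwB := pvB_loop_char ds a b n (by omega) n.toNat 0 (by omega) (by omega) hH
    rw [show ((0 : Nat) : Int) = (0 : Int) by norm_num] at hwB
    simp only [List.drop_zero, List.take_zero, List.reverse_nil, List.takeWhile_nil,
      List.length_nil, Nat.cast_zero, sub_zero, Nat.zero_add] at hwB
    rw [hwB]
    rw [pvSumBool_mark]
    by_cases hbr : (P : Int) > n - m
    · rw [if_pos (by rw [← hP]; exact hbr), if_neg (by rw [← hP] at *; omega)]
      have hPn : (P : Int) ≤ n := by omega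
      have hsplit : PySem.List.pyRange 0 n 1
          = PySem.List.pyRange 0 (P : Int) 1 ++ PySem.List.pyRange (P : Int) n 1 :=
        PySem.List.pyRange_one_append 0 (P : Int) n (by omega) hPn
      rw [← hP, hsplit, List.reverse_append]
      rw [pv_loop2_skip ds b P (n.toNat - P) _ _
        (by intro i hi; rw [List.mem_reverse, PySem.List.mem_pyRange_one] at hi; exact hi.1)]
      rw [pv_loop2_unmark ds b P (n.toNat - P) (by omega)]
      rw [pvSumBool_mark]
      have hR : ((ds.take P).reverse.takeWhile (fun x => decide (x ≤ b))).length ≤ P := by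
        have := congrArg List.length (List.takeWhile_append_dropWhile (p := fun x => decide (x ≤ b)) (l := (ds.take P).reverse))
        simp only [List.length_append] at this
        simp only [List.length_reverse, List.length_take] at this
        omega
      omega
    · rw [if_neg (by rw [← hP]; exact hbr), if_pos (by rw [← hP] at *; omega), pvSumBool_mark]
  · -- n <= 0 : empty range on the A side, immediate exit of the loop on the B side
    rw [PySem.List.pyRange_one_eq_nil (by omega)]
    simp only [List.map_nil, pvA_loop1, List.reverse_nil, pvA_loop2]
    rw [pvB_loop.eq_def, dif_neg (fun h => absurd h.1 (by omega))]
    have h0 : pvSumBool [] = 0 := by simp [pvSumBool]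
    rw [h0]
    split <;> split <;> simp [pvSumBool]
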